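-- pv_equiv track=rewrite | github.com/msantelli/m_peirce | languages/german.py | apply_case
-- ===== SOURCE A (Python) =====
-- def apply_case(word: str, case: str) -> str:
--     """Apply German grammatical case."""
--     # German has 4 cases: nominative, accusative, dative, genitive
--     # This is highly simplified
--
--     article_cases = {
--         'der': {
--             'nominative': 'der',
--             'accusative': 'den',
--             'dative': 'dem',
--             'genitive': 'des'
--         },
--         'die': {
--             'nominative': 'die',
--             'accusative': 'die',
--             'dative': 'der',
--             'genitive': 'der'
--         },
--         'das': {
--             'nominative': 'das',
--             'accusative': 'das',
--             'dative': 'dem',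
--             'genitive': 'des'
--         }
--     }
--
--     # Handle articles
--     for article, cases in article_cases.items():
--         if word.startswith(article + ' '):
--             new_article = cases.get(case, article)
--             return word.replace(article, new_article, 1)
--
--     return word
-- ===== SOURCE B (Python) =====
-- def apply_case(word: str, case: str) -> str:
--     """Apply German grammatical case."""
--     # Decline the article by its ending rules instead of a full lookup table:
--     # 'd' + mid ('er'/'ie'/'as'); feminine 'die' -> 'der' in dative/genitive,
--     # otherwise the ending consonant is n/m/s for accusative/dative/genitive
--     # (with 'das' keeping its form in the accusative), else unchanged.
--     if word[:1] != 'd' or word[3:4] != ' ' or word[1:3] not in ('er', 'ie', 'as'):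
--         return word
--     mid = word[1:3]
--     if mid == 'ie':
--         new = 'der' if case in ('dative', 'genitive') else 'die'
--     else:
--         end = {'accusative': 'n', 'dative': 'm', 'genitive': 's'}.get(case)
--         if end is None or (mid == 'as' and case == 'accusative'):
--             new = 'd' + mid
--         else:
--             new = 'de' + end
--     return new + word[3:]
-- ===== Notes on version B (the rewrite author's own statement) =====
-- stated objective: alternative
-- what changed: Replaced A's scan over a full three-article declension table (startswith + count-limited str.replace per candidate) by character-level slicing of the fixed-shape prefix ('d' + mid + ' ') and a closed-form declension rule that computes the new article from its middle letters and the case's ending consonant, instead of looking the whole form up.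
import Mathlib
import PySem

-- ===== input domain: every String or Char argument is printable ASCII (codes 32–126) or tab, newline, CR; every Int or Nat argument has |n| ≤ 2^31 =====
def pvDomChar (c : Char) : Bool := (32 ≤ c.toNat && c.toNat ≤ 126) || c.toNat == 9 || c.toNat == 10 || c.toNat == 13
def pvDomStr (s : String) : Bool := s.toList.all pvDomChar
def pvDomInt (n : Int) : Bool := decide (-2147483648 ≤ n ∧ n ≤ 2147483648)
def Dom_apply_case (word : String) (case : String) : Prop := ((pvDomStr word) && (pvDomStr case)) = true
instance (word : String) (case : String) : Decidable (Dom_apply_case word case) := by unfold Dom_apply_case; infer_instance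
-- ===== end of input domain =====

-- B replaces A's scan over a full declension table (startswith + count-limited replace per
-- candidate article) by slicing the fixed-shape prefix and computing the declined article from
-- a closed-form ending rule; objective: an alternative algorithm of similar cost.

-- ===== PORT A =====
-- the article_cases table literal of A
def articleCasesTable : PySem.Dict String (PySem.Dict String String) :=
  PySem.Dict.ofList
    [("der", PySem.Dict.ofList [("nominative", "der"), ("accusative", "den"), ("dative", "dem"), ("genitive", "des")]),
     ("die", PySem.Dict.ofList [("nominative", "die"), ("accusative", "die"), ("dative", "der"), ("genitive", "der")]),
     ("das", PySem.Dict.ofList [("nominative", "das"), ("accusative", "das"), ("dative", "dem"), ("genitive", "des")])]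

-- hand port of word.replace(old, new, 1) (PySem has no count-limited replace): exact —
-- Python replaces the FIRST occurrence of old (Chars.find) and only that one; for old = ''
-- Python prepends new, and find s [] = 0 gives the same result.
def replaceOnce (s old new_ : List Char) : List Char :=
  let i := PySem.Chars.find s old
  if i = -1 then s
  else s.take i.toNat ++ new_ ++ s.drop (i.toNat + old.length)

-- the 'for article, cases in article_cases.items():' loop of A, step for step
def applyCaseLoop (word : List Char) (case : String) : List (String × PySem.Dict String String) → List Char
  | [] => word
  | (article, cases) :: rest =>
    if PySem.Chars.startswith word (article.toList ++ [' ']) then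
      replaceOnce word article.toList (PySem.Dict.getD cases case article).toList
    else applyCaseLoop word case rest

def apply_case (word : String) (case : String) : String :=
  String.ofList (applyCaseLoop word.toList case articleCasesTable.items)

-- ===== PORT B =====
-- Python string slices word[:1], word[1:3], word[3:4], word[3:] with non-negative bounds are
-- exactly take/drop on the character list.
def apply_case_alt (word : String) (case : String) : String :=
  let l := word.toList
  let mid := (l.drop 1).take 2
  if l.take 1 ≠ ['d'] ∨ (l.drop 3).take 1 ≠ [' '] ∨
     ¬ (mid = "er".toList ∨ mid = "ie".toList ∨ mid = "as".toList) then
    word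
  else
    let newa : List Char :=
      if mid = "ie".toList then
        if case = "dative" ∨ case = "genitive" then "der".toList else "die".toList
      else
        match PySem.Dict.get? (PySem.Dict.ofList [("accusative", 'n'), ("dative", 'm'), ("genitive", 's')]) case with
        | none => 'd' :: mid
        | some e => if mid = "as".toList ∧ case = "accusative" then 'd' :: mid else ['d', 'e', e]
    String.ofList (newa ++ l.drop 3)

-- ===== PRECONDITION & SPEC =====
def Spec_apply_case (word : String) (case : String) (out : String) : Prop := out = apply_case_alt word case
instance (word : String) (case : String) (out : String) : Decidable (Spec_apply_case word case out) := by unfold Spec_apply_case; infer_instance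

-- ===== CLAIM (what is proved, stated in full; the proofs are below) =====
def Claim_equal_apply_case : Prop := ∀ (word : String) (case : String), Dom_apply_case word case → Spec_apply_case word case (apply_case word case)

-- ===== LEMMAS AND PROOFS =====

-- if sub is a prefix of s, find points at position 0
lemma find_eq_zero_of_prefix (s sub : List Char) (h : sub <+: s) : PySem.Chars.find s sub = 0 := by
  have hnn : 0 ≤ PySem.Chars.find s sub := (PySem.Chars.find_nonneg_iff s sub).2 h.isInfix
  obtain ⟨hpre, hmin⟩ := PySem.Chars.find_spec hnn
  by_contra hne
  have hpos : 0 < (PySem.Chars.find s sub).toNat := by omega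
  exact hmin 0 hpos (by simpa using h)

-- A's replace(article, new, 1) on a word that starts with the article swaps the prefix
lemma replaceOnce_of_prefix (abc r new_ : List Char) :
    replaceOnce (abc ++ r) abc new_ = new_ ++ r := by
  have h0 : PySem.Chars.find (abc ++ r) abc = 0 := find_eq_zero_of_prefix _ _ ⟨r, rfl⟩
  unfold replaceOnce
  simp [h0]

lemma beq_false_of_ne' (k case : String) (h : ¬ case = k) : (k == case) = false := by
  simp; exact fun h' => h h'.symm

-- B's ending lookup misses on any case other than the three declining ones
lemma get?_none3 (case : String) (h1 : ¬ case = "accusative") (h2 : ¬ case = "dative") (h3 : ¬ case = "genitive") :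
    (PySem.Dict.ofList [("accusative",'n'),("dative",'m'),("genitive",'s')]).get? case = none := by
  have e : PySem.Dict.ofList [("accusative",'n'),("dative",'m'),("genitive",'s')]
      = PySem.Dict.mk [("accusative",'n'),("dative",'m'),("genitive",'s')] := by rfl
  rw [e, PySem.Dict.get?_mk_cons, PySem.Dict.get?_mk_cons, PySem.Dict.get?_mk_cons]
  simp [beq_false_of_ne' _ _ h1, beq_false_of_ne' _ _ h2, beq_false_of_ne' _ _ h3, PySem.Dict.get?]

-- A's per-article dict falls back to the article itself on an unknown case
lemma getD4_default (v1 v2 v3 v4 case dflt : String)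
    (h0 : ¬ case = "nominative") (h1 : ¬ case = "accusative") (h2 : ¬ case = "dative") (h3 : ¬ case = "genitive") :
    (PySem.Dict.ofList [("nominative", v1), ("accusative", v2), ("dative", v3), ("genitive", v4)]).getD case dflt = dflt := by
  have e : PySem.Dict.ofList [("nominative", v1), ("accusative", v2), ("dative", v3), ("genitive", v4)]
      = PySem.Dict.mk [("nominative", v1), ("accusative", v2), ("dative", v3), ("genitive", v4)] := by
    simp [PySem.Dict.ofList, PySem.Dict.update, PySem.Dict.insert, PySem.Dict.empty, PySem.Dict.contains]
  rw [PySem.Dict.getD_eq_get?_getD, e, PySem.Dict.get?_mk_cons, PySem.Dict.get?_mk_cons,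
      PySem.Dict.get?_mk_cons, PySem.Dict.get?_mk_cons]
  simp [beq_false_of_ne' _ _ h0, beq_false_of_ne' _ _ h1, beq_false_of_ne' _ _ h2,
        beq_false_of_ne' _ _ h3, PySem.Dict.get?]

-- both sides rejoin the declined article with the untouched rest
lemma push_article (x t : List Char) (s : String) (hg : String.ofList x = s) :
    String.ofList (x ++ ' ' :: t) = s ++ String.ofList (' ' :: t) := by
  rw [← hg, ← String.ofList_append]

-- on an article match, B's computed article equals A's table entry (checked over the
-- relevant values of `case`), and both rejoin it with the untouched rest
lemma altNewa_der (t : List Char) (case : String) :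
    apply_case_alt (String.ofList ('d' :: 'e' :: 'r' :: ' ' :: t)) case
      = String.ofList ((PySem.Dict.getD
          (PySem.Dict.ofList [("nominative", "der"), ("accusative", "den"), ("dative", "dem"), ("genitive", "des")])
          case "der").toList ++ ' ' :: t) := by
  unfold apply_case_alt
  by_cases h1 : case = "accusative"
  · subst h1; simp; (try decide); try exact push_article ['d', 'e', 'n'] t _ (by decide)
  · by_cases h2 : case = "dative"
    · subst h2; simp; (try decide); try exact push_article ['d', 'e', 'm'] t _ (by decide)
    · by_cases h3 : case = "genitive"
      · subst h3; simp; (try decide); try exact push_article ['d', 'e', 's'] t _ (by decide)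
      · by_cases h0 : case = "nominative"
        · subst h0; simp; (try decide); try exact push_article ['d', 'e', 'r'] t _ (by decide)
        · simp [get?_none3 case h1 h2 h3, getD4_default _ _ _ _ _ _ h0 h1 h2 h3]
          try decide
          try exact push_article ['d', 'e', 'r'] t _ (by decide)

lemma altNewa_die (t : List Char) (case : String) :
    apply_case_alt (String.ofList ('d' :: 'i' :: 'e' :: ' ' :: t)) case
      = String.ofList ((PySem.Dict.getD
          (PySem.Dict.ofList [("nominative", "die"), ("accusative", "die"), ("dative", "der"), ("genitive", "der")])
          case "die").toList ++ ' ' :: t) := by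
  unfold apply_case_alt
  by_cases h1 : case = "accusative"
  · subst h1; simp; (try decide); try exact push_article ['d', 'i', 'e'] t _ (by decide)
  · by_cases h2 : case = "dative"
    · subst h2; simp; (try decide); try exact push_article ['d', 'e', 'r'] t _ (by decide)
    · by_cases h3 : case = "genitive"
      · subst h3; simp; (try decide); try exact push_article ['d', 'e', 'r'] t _ (by decide)
      · by_cases h0 : case = "nominative"
        · subst h0; simp; (try decide); try exact push_article ['d', 'i', 'e'] t _ (by decide)
        · simp [h2, h3, getD4_default _ _ _ _ _ _ h0 h1 h2 h3]
          try decide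
          try exact push_article ['d', 'i', 'e'] t _ (by decide)

lemma altNewa_das (t : List Char) (case : String) :
    apply_case_alt (String.ofList ('d' :: 'a' :: 's' :: ' ' :: t)) case
      = String.ofList ((PySem.Dict.getD
          (PySem.Dict.ofList [("nominative", "das"), ("accusative", "das"), ("dative", "dem"), ("genitive", "des")])
          case "das").toList ++ ' ' :: t) := by
  unfold apply_case_alt
  by_cases h1 : case = "accusative"
  · subst h1; simp; (try decide); try exact push_article ['d', 'a', 's'] t _ (by decide)
  · by_cases h2 : case = "dative"
    · subst h2; simp; (try decide); try exact push_article ['d', 'e', 'm'] t _ (by decide)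
    · by_cases h3 : case = "genitive"
      · subst h3; simp; (try decide); try exact push_article ['d', 'e', 's'] t _ (by decide)
      · by_cases h0 : case = "nominative"
        · subst h0; simp; (try decide); try exact push_article ['d', 'a', 's'] t _ (by decide)
        · simp [get?_none3 case h1 h2 h3, getD4_default _ _ _ _ _ _ h0 h1 h2 h3]
          try decide
          try exact push_article ['d', 'a', 's'] t _ (by decide)

-- when no article+space prefix matches, B's guard sends the word through unchanged
lemma alt_id_of_no_prefix (l : List Char) (case : String)
    (hder : ¬ ['d', 'e', 'r', ' '] <+: l)
    (hdie : ¬ ['d', 'i', 'e', ' '] <+: l)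
    (hdas : ¬ ['d', 'a', 's', ' '] <+: l) :
    apply_case_alt (String.ofList l) case = String.ofList l := by
  unfold apply_case_alt
  simp only [String.toList_ofList]
  match l with
  | [] => simp
  | [a] => simp
  | [a, b] => simp
  | [a, b, c] => simp
  | a :: b :: c :: d :: t =>
    by_cases ha : a = 'd'
    · by_cases hd : d = ' '
      · subst ha; subst hd
        have m1 : ¬ (b = 'e' ∧ c = 'r') := fun ⟨hb, hc⟩ => hder ⟨t, by rw [hb, hc]; rfl⟩
        have m2 : ¬ (b = 'i' ∧ c = 'e') := fun ⟨hb, hc⟩ => hdie ⟨t, by rw [hb, hc]; rfl⟩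
        have m3 : ¬ (b = 'a' ∧ c = 's') := fun ⟨hb, hc⟩ => hdas ⟨t, by rw [hb, hc]; rfl⟩
        simp
        intro h1
        exact absurd (h1 (fun hb hc => m1 ⟨hb, hc⟩) (fun hb hc => m2 ⟨hb, hc⟩)) m3
      · simp [hd]
    · simp [ha]

-- list-level main equivalence
lemma main_eq (l : List Char) (case : String) :
    String.ofList (applyCaseLoop l case articleCasesTable.items)
      = apply_case_alt (String.ofList l) case := by
  by_cases hder : ['d', 'e', 'r', ' '] <+: l
  · obtain ⟨t, rfl⟩ := hder
    have hA : applyCaseLoop (['d','e','r',' '] ++ t) case articleCasesTable.items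
        = replaceOnce (['d','e','r'] ++ (' ' :: t)) ['d','e','r']
            (PySem.Dict.getD (PySem.Dict.ofList [("nominative", "der"), ("accusative", "den"), ("dative", "dem"), ("genitive", "des")]) case "der").toList := by
      rfl
    rw [hA, replaceOnce_of_prefix]
    exact (altNewa_der t case).symm
  · by_cases hdie : ['d', 'i', 'e', ' '] <+: l
    · obtain ⟨t, rfl⟩ := hdie
      have hA : applyCaseLoop (['d','i','e',' '] ++ t) case articleCasesTable.items
          = replaceOnce (['d','i','e'] ++ (' ' :: t)) ['d','i','e']
              (PySem.Dict.getD (PySem.Dict.ofList [("nominative", "die"), ("accusative", "die"), ("dative", "der"), ("genitive", "der")]) case "die").toList := by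
        rfl
      rw [hA, replaceOnce_of_prefix]
      exact (altNewa_die t case).symm
    · by_cases hdas : ['d', 'a', 's', ' '] <+: l
      · obtain ⟨t, rfl⟩ := hdas
        have hA : applyCaseLoop (['d','a','s',' '] ++ t) case articleCasesTable.items
            = replaceOnce (['d','a','s'] ++ (' ' :: t)) ['d','a','s']
                (PySem.Dict.getD (PySem.Dict.ofList [("nominative", "das"), ("accusative", "das"), ("dative", "dem"), ("genitive", "des")]) case "das").toList := by
          rfl
        rw [hA, replaceOnce_of_prefix]
        exact (altNewa_das t case).symm
      · have c1 : PySem.Chars.startswith l ("der".toList ++ [' ']) = false := by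
          cases hb : PySem.Chars.startswith l ("der".toList ++ [' ']) with
          | false => rfl
          | true => exact absurd ((PySem.Chars.startswith_iff _ _).1 hb) (by simpa using hder)
        have c2 : PySem.Chars.startswith l ("die".toList ++ [' ']) = false := by
          cases hb : PySem.Chars.startswith l ("die".toList ++ [' ']) with
          | false => rfl
          | true => exact absurd ((PySem.Chars.startswith_iff _ _).1 hb) (by simpa using hdie)
        have c3 : PySem.Chars.startswith l ("das".toList ++ [' ']) = false := by
          cases hb : PySem.Chars.startswith l ("das".toList ++ [' ']) with
          | false => rfl
          | true => exact absurd ((PySem.Chars.startswith_iff _ _).1 hb) (by simpa using hdas)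
        have hA : applyCaseLoop l case articleCasesTable.items = l := by
          show applyCaseLoop l case [("der", _), ("die", _), ("das", _)] = l
          simp only [applyCaseLoop, c1, c2, c3]
          simp
        rw [hA, alt_id_of_no_prefix l case hder hdie hdas]

-- ===== VERDICT (by name: the statement is the Claim_ definition above) =====
theorem apply_case_spec : Claim_equal_apply_case := by
  intro word case _
  unfold Spec_apply_case apply_case
  have h := main_eq word.toList case
  rwa [String.ofList_toList] at h
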